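-- pv_equiv track=rewrite | github.com/WonbinKweon/TopicK_EMNLP2025 | utils.py | omit_substrings
-- ===== SOURCE A (Python) =====
-- def omit_substrings(terms):
--     sorted_terms = sorted(terms, key=len)
--     result = []
--
--     for i, term in enumerate(sorted_terms):
--         is_prefix = False
--         for other_term in sorted_terms[i+1:]:
--             if term in other_term:
--                 is_prefix = True
--                 break
--         if not is_prefix:
--             result.append(term)
--
--     return result
-- ===== SOURCE B (Python) =====
-- def omit_substrings(terms):
--     # Scan the length-sorted list from longest to shortest, keeping a term only
--     # if it is not contained in any already-kept (longer-or-equal) term; by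
--     # transitivity of containment this equals checking against ALL later terms.
--     kept = []
--     for t in reversed(sorted(terms, key=len)):
--         if all(t not in u for u in kept):
--             kept.append(t)
--     kept.reverse()
--     return kept
-- ===== Notes on version B (the rewrite author's own statement) =====
-- stated objective: alternative
-- what changed: Instead of checking each sorted term against every later term, B scans the length-sorted list longest-first and tests each term only against the already-kept maximal terms (correct by transitivity of substring containment), so redundant terms are never scanned against.
import Mathlib
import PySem

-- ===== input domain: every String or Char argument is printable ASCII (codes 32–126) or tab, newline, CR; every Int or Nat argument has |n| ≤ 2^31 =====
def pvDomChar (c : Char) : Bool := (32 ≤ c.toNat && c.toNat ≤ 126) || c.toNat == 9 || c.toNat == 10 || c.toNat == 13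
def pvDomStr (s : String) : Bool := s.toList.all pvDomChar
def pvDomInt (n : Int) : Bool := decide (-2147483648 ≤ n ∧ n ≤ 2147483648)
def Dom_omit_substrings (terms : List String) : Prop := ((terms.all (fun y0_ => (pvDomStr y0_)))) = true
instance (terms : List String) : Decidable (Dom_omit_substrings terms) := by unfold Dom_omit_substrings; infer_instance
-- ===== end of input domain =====

-- B replaces A's scan of ALL later sorted terms by a longest-first scan that tests each term
-- only against the already-KEPT (maximal) terms; equal by transitivity of containment (alternative decomposition).

-- ===== PORT A =====
def omit_substrings (terms : List String) : List String :=
  let sorted_terms := PySem.List.sorted terms (fun t => PySem.Str.len t) false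
  (PySem.List.enumerate sorted_terms 0).foldl
    (fun result it =>
      let is_prefix :=
        (PySem.List.slice sorted_terms (some (it.1 + 1)) none).any
          (fun other_term => PySem.Str.isIn it.2 other_term)
      if !is_prefix then result ++ [it.2] else result) []

-- ===== PORT B =====
def omit_substrings_alt (terms : List String) : List String :=
  let s := (PySem.List.sorted terms (fun t => PySem.Str.len t) false).reverse
  let kept := s.foldl
    (fun kept t =>
      if kept.all (fun u => !(PySem.Str.isIn t u)) then kept ++ [t] else kept) []
  kept.reverse

-- ===== PRECONDITION & SPEC =====
def Spec_omit_substrings (terms : List String) (out : List String) : Prop := out = omit_substrings_alt terms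
instance (terms : List String) (out : List String) : Decidable (Spec_omit_substrings terms out) := by unfold Spec_omit_substrings; infer_instance

-- ===== CLAIM (what is proved, stated in full; the proofs are below) =====
def Claim_equal_omit_substrings : Prop := ∀ (terms : List String), Dom_omit_substrings terms → Spec_omit_substrings terms (omit_substrings terms)

-- ===== LEMMAS AND PROOFS =====

-- A's per-element rule, as structural recursion on the sorted list: keep t iff no later term contains it.
def pvAfilt : List String → List String
  | [] => []
  | t :: rest =>
    if rest.any (fun u => PySem.Str.isIn t u) then pvAfilt rest else t :: pvAfilt rest

-- B's per-element rule, right-to-left: keep t iff no already-kept (later) term contains it.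
def pvKept : List String → List String
  | [] => []
  | t :: rest =>
    let k := pvKept rest
    if k.all (fun u => !(PySem.Str.isIn t u)) then t :: k else k

theorem pvIsIn_refl (t : String) : PySem.Str.isIn t t = true := by
  rw [PySem.Str.isIn_iff_infix]

theorem pvIsIn_trans {a b c : String} (h1 : PySem.Str.isIn a b = true)
    (h2 : PySem.Str.isIn b c = true) : PySem.Str.isIn a c = true := by
  rw [PySem.Str.isIn_iff_infix] at *; exact h1.trans h2

theorem pvAllNot {α : Type} (l : List α) (p : α → Bool) :
    l.all (fun u => !p u) = !(l.any p) := by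
  induction l with
  | nil => rfl
  | cons a l ih => simp [List.all_cons, List.any_cons, ih]

theorem pvKept_cons_pos (t : String) (rest : List String)
    (h : (pvKept rest).any (fun u => PySem.Str.isIn t u) = false) :
    pvKept (t :: rest) = t :: pvKept rest := by
  simp only [pvKept]; rw [if_pos]; rw [pvAllNot, h]; rfl

theorem pvKept_cons_neg (t : String) (rest : List String)
    (h : (pvKept rest).any (fun u => PySem.Str.isIn t u) = true) :
    pvKept (t :: rest) = pvKept rest := by
  simp only [pvKept]; rw [if_neg]; rw [pvAllNot, h]; simp

theorem pvKept_subset : ∀ l : List String, ∀ x ∈ pvKept l, x ∈ l := by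
  intro l
  induction l with
  | nil => intro x hx; simp [pvKept] at hx
  | cons t rest ih =>
    intro x hx
    rcases hb : (pvKept rest).any (fun u => PySem.Str.isIn t u) with _ | _
    · rw [pvKept_cons_pos t rest hb] at hx
      rcases List.mem_cons.mp hx with rfl | h
      · exact List.mem_cons_self ..
      · exact List.mem_cons_of_mem _ (ih x h)
    · rw [pvKept_cons_neg t rest hb] at hx
      exact List.mem_cons_of_mem _ (ih x hx)

theorem pvKept_cover : ∀ l : List String, ∀ x ∈ l, ∃ u ∈ pvKept l, PySem.Str.isIn x u = true := by
  intro l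
  induction l with
  | nil => intro x hx; simp at hx
  | cons t rest ih =>
    intro x hx
    rcases List.mem_cons.mp hx with rfl | hx
    · rcases hb : (pvKept rest).any (fun u => PySem.Str.isIn x u) with _ | _
      · exact ⟨x, by rw [pvKept_cons_pos x rest hb]; exact List.mem_cons_self .., pvIsIn_refl x⟩
      · rcases List.any_eq_true.mp hb with ⟨u, hu, hiu⟩
        exact ⟨u, by rw [pvKept_cons_neg x rest hb]; exact hu, hiu⟩
    · rcases ih x hx with ⟨u, hu, hiu⟩
      refine ⟨u, ?_, hiu⟩
      rcases hb : (pvKept rest).any (fun v => PySem.Str.isIn t v) with _ | _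
      · rw [pvKept_cons_pos t rest hb]; exact List.mem_cons_of_mem _ hu
      · rw [pvKept_cons_neg t rest hb]; exact hu

theorem pvGuard_eq (t : String) (rest : List String) :
    rest.any (fun u => PySem.Str.isIn t u) = (pvKept rest).any (fun u => PySem.Str.isIn t u) := by
  rcases h : (pvKept rest).any (fun u => PySem.Str.isIn t u) with _ | _
  · rw [Bool.eq_false_iff]
    intro hc
    rcases List.any_eq_true.mp hc with ⟨u, hu, hiu⟩
    rcases pvKept_cover rest u hu with ⟨w, hw, hiw⟩
    have : (pvKept rest).any (fun u => PySem.Str.isIn t u) = true :=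
      List.any_eq_true.mpr ⟨w, hw, pvIsIn_trans hiu hiw⟩
    rw [h] at this; cases this
  · rcases List.any_eq_true.mp h with ⟨u, hu, hiu⟩
    exact List.any_eq_true.mpr ⟨u, pvKept_subset rest u hu, hiu⟩

theorem pvAfilt_eq_pvKept (l : List String) : pvAfilt l = pvKept l := by
  induction l with
  | nil => rfl
  | cons t rest ih =>
    simp only [pvAfilt, pvGuard_eq t rest]
    rcases hb : (pvKept rest).any (fun u => PySem.Str.isIn t u) with _ | _
    · rw [if_neg (by simp), ih, pvKept_cons_pos t rest hb]
    · rw [if_pos rfl, ih, pvKept_cons_neg t rest hb]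

-- A's fold over enumerate+slice computes pvAfilt of the sorted list.
set_option maxRecDepth 8192 in
theorem pvA_fold (full : List String) :
    ∀ (l : List String) (k : Nat) (acc : List String), full.drop k = l →
    (PySem.List.enumerate l (k : Int)).foldl
      (fun result it =>
        if !((PySem.List.slice full (some (it.1 + 1)) none).any
              (fun o => PySem.Str.isIn it.2 o)) then result ++ [it.2] else result) acc
    = acc ++ pvAfilt l := by
  intro l
  induction l with
  | nil =>
    intro k acc h
    rw [PySem.List.enumerate_nil, List.foldl_nil,
      show pvAfilt [] = [] from rfl, List.append_nil]
  | cons t rest ih =>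
    intro k acc h
    have hdrop : full.drop (k + 1) = rest := by
      rw [← List.drop_drop, h]; rfl
    have hk1 : ((k : Int) + 1) = ((k + 1 : Nat) : Int) := by push_cast; ring
    have hslice : PySem.List.slice full (some ((k + 1 : Nat) : Int)) none = rest := by
      rw [PySem.List.slice_from_natCast, hdrop]
    rw [PySem.List.enumerate_cons, List.foldl_cons]
    simp only [hk1, hslice]
    rw [ih (k + 1) _ hdrop]
    simp only [pvAfilt]
    rcases hb : rest.any (fun u => PySem.Str.isIn t u) with _ | _
    · rw [if_pos (by simp), if_neg (by simp), List.append_assoc, List.singleton_append]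
    · rw [if_neg (by simp), if_pos rfl]

-- B's fold over the reversed list builds pvKept, reversed.
theorem pvB_fold (l : List String) :
    (l.reverse).foldl
      (fun kept t =>
        if kept.all (fun u => !(PySem.Str.isIn t u)) then kept ++ [t] else kept) []
    = (pvKept l).reverse := by
  induction l with
  | nil => rfl
  | cons t rest ih =>
    rw [List.reverse_cons, List.foldl_append, ih, List.foldl_cons, List.foldl_nil]
    simp only [pvKept, List.all_reverse]
    split <;> simp

-- ===== VERDICT (by name: the statement is the Claim_ definition above) =====
theorem omit_substrings_spec : Claim_equal_omit_substrings := by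
  intro terms _
  unfold Spec_omit_substrings omit_substrings omit_substrings_alt
  simp only []
  rw [pvB_fold, List.reverse_reverse]
  have hA := pvA_fold (PySem.List.sorted terms (fun t => PySem.Str.len t) false)
      (PySem.List.sorted terms (fun t => PySem.Str.len t) false) 0 [] rfl
  simp only [Nat.cast_zero] at hA
  rw [hA, List.nil_append, pvAfilt_eq_pvKept]
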